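-- pv_equiv track=rewrite | github.com/gaurav-bhandari3290/Learn-Code | Assignment-1/Naming Convention/AssginmentThree.py | calculate_armstrong_sum
-- ===== SOURCE A (Python) =====
-- def calculate_armstrong_sum(number):
--     # Initializing Sum and Number of Digits
--     armstrong_sum = 0
--     number_of_digit = 0
--
--     # Calculating Number of individual digits
--     number_copy = number
--     while number_copy > 0:
--         number_of_digit = number_of_digit + 1
--         number_copy = number_copy // 10
--
--     # Finding Armstrong Number
--     number_copy = number
--     for number in range(1, number_copy + 1):
--         digit = number_copy % 10
--         armstrong_sum = armstrong_sum + (digit ** number_of_digit)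
--         number_copy //= 10
--     return armstrong_sum
-- ===== SOURCE B (Python) =====
-- def calculate_armstrong_sum(number):
--     # Collect the digits once (low to high), then one pass over them:
--     # O(log n) instead of A's range(1, number+1) loop of n iterations.
--     digits = []
--     n = number
--     while n > 0:
--         digits.append(n % 10)
--         n //= 10
--     k = len(digits)
--     return sum(d ** k for d in digits)
-- ===== Notes on version B (the rewrite author's own statement) =====
-- stated objective: faster
-- what changed: B collects the digits in one O(log n) while-loop and sums d**k over them, instead of A's for-loop over range(1, number+1) which runs number iterations (adding 0**k once the digits run out).
import Mathlib
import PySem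

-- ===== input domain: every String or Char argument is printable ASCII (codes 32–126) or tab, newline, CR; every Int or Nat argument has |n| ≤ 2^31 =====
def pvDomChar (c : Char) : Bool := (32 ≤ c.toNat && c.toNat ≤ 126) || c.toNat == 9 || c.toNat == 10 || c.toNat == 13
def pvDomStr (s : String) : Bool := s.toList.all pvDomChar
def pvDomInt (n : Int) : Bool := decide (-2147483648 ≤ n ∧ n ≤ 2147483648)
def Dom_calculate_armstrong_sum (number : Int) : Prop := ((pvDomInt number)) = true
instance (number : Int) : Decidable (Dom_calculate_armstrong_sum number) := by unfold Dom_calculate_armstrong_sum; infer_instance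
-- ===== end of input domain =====

-- B collects the digits once in an O(log n) loop and sums d^k over them, instead of
-- A's loop of `number` iterations; proved equal for every Int input (objective: faster).


-- ===== PORT A =====
-- while number_copy > 0: number_of_digit += 1; number_copy //= 10
def pvCountDigits (n : Int) : Int :=
  if n > 0 then pvCountDigits (PySem.Int.floordiv n 10) + 1 else 0
termination_by n.toNat
decreasing_by
  rw [PySem.Int.floordiv_eq_ediv_of_pos (by omega : (0:Int) < 10)]
  omega

-- for number in range(1, number_copy + 1): ...   (state = (armstrong_sum, number_copy);
--  digit ** number_of_digit with number_of_digit ≥ 0 is exactly `^ d.toNat`)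
def calculate_armstrong_sum (number : Int) : Int :=
  let d := pvCountDigits number
  let r := (PySem.List.pyRange 1 (number + 1) 1).foldl
    (fun (st : Int × Int) _ =>
      (st.1 + (PySem.Int.mod st.2 10) ^ d.toNat, PySem.Int.floordiv st.2 10))
    (0, number)
  r.1

-- ===== PORT B =====
-- while n > 0: digits.append(n % 10); n //= 10   (digits, low digit first)
def pvDigits (n : Int) : List Int :=
  if n > 0 then PySem.Int.mod n 10 :: pvDigits (PySem.Int.floordiv n 10) else []
termination_by n.toNat
decreasing_by
  rw [PySem.Int.floordiv_eq_ediv_of_pos (by omega : (0:Int) < 10)]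
  omega

-- k = len(digits); sum(d ** k for d in digits)
def calculate_armstrong_sum_alt (number : Int) : Int :=
  let digits := pvDigits number
  let k := digits.length
  (digits.map (fun d => d ^ k)).sum

-- ===== PRECONDITION & SPEC =====
def Spec_calculate_armstrong_sum (number : Int) (out : Int) : Prop := out = calculate_armstrong_sum_alt number
instance (number : Int) (out : Int) : Decidable (Spec_calculate_armstrong_sum number out) := by unfold Spec_calculate_armstrong_sum; infer_instance

-- ===== CLAIM (what is proved, stated in full; the proofs are below) =====
def Claim_equal_calculate_armstrong_sum : Prop := ∀ (number : Int), Dom_calculate_armstrong_sum number → Spec_calculate_armstrong_sum number (calculate_armstrong_sum number)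

-- ===== LEMMAS AND PROOFS =====

-- A's digit counter is the length of B's digit list.
theorem pvCountDigits_eq_length (n : Int) : pvCountDigits n = ((pvDigits n).length : Int) := by
  induction n using pvDigits.induct with
  | case1 n h ih =>
    rw [pvCountDigits, pvDigits]
    simp only [h, if_true, List.length_cons, ih]
    push_cast; ring
  | case2 n h => rw [pvCountDigits, pvDigits]; simp [h]

-- the digit list is never longer than the number itself
theorem pvDigits_length_le (n : Int) (hn : 0 < n) : (pvDigits n).length ≤ n.toNat := by
  induction n using pvDigits.induct with
  | case1 n h ih =>
    rw [pvDigits]; simp only [if_pos h, List.length_cons]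
    by_cases h2 : PySem.Int.floordiv n 10 > 0
    · have := ih h2
      rw [PySem.Int.floordiv_eq_ediv_of_pos (by omega : (0:Int) < 10)] at this ⊢
      omega
    · rw [pvDigits]; simp only [if_neg h2, List.length_nil]; omega
  | case2 n h => exact absurd hn h

-- a body that ignores the list element is iteration of g, length-many times
theorem foldl_const_body {α β : Type} (g : β → β) (l : List α) (init : β) :
    l.foldl (fun st _ => g st) init = g^[l.length] init := by
  induction l generalizing init with
  | nil => rfl
  | cons x xs ih => simp [List.foldl_cons, ih, Function.iterate_succ_apply]

-- core invariant: m iterations of A's body, with m at least the number of digits left,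
-- add exactly B's sum over the remaining digits (k ≥ 1 makes the trailing 0^k terms vanish)
theorem pvLoop_eval (k : Nat) (hk : 1 ≤ k) :
    ∀ (m : Nat) (s nc : Int), 0 ≤ nc → (pvDigits nc).length ≤ m →
    ((fun (st : Int × Int) =>
        (st.1 + (PySem.Int.mod st.2 10) ^ k, PySem.Int.floordiv st.2 10))^[m] (s, nc)).1
      = s + ((pvDigits nc).map (fun d => d ^ k)).sum := by
  intro m
  induction m with
  | zero =>
    intro s nc _ hlen
    have : pvDigits nc = [] := List.length_eq_zero_iff.mp (Nat.le_zero.mp hlen)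
    simp [this]
  | succ m ih =>
    intro s nc hnc hlen
    rw [Function.iterate_succ_apply]
    by_cases h : nc > 0
    · rw [pvDigits] at hlen ⊢
      simp only [if_pos h, List.length_cons] at hlen ⊢
      have hfd : 0 ≤ PySem.Int.floordiv nc 10 := by
        rw [PySem.Int.floordiv_eq_ediv_of_pos (by omega : (0:Int) < 10)]; omega
      rw [ih _ _ hfd (by omega)]
      simp [add_assoc]
    · have hz : nc = 0 := by omega
      subst hz
      have hd0 : pvDigits 0 = [] := by rw [pvDigits]; simp
      have hstep : (PySem.Int.mod 0 10) ^ k = 0 := by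
        have : PySem.Int.mod 0 10 = 0 := by decide
        rw [this]; exact zero_pow (by omega)
      have hfd : PySem.Int.floordiv 0 10 = 0 := by decide
      simp only [hstep, hfd, add_zero]
      rw [ih s 0 le_rfl (by simp [hd0])]

-- ===== VERDICT (by name: the statement is the Claim_ definition above) =====
theorem calculate_armstrong_sum_spec : Claim_equal_calculate_armstrong_sum := by
  intro number _
  unfold Spec_calculate_armstrong_sum calculate_armstrong_sum calculate_armstrong_sum_alt
  by_cases h : 0 < number
  · have hk : 1 ≤ (pvDigits number).length := by
      rw [pvDigits]; simp [h]
    have hd : (pvCountDigits number).toNat = (pvDigits number).length := by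
      rw [pvCountDigits_eq_length]; exact Int.toNat_natCast _
    simp only [hd, foldl_const_body]
    rw [PySem.List.length_pyRange_one]
    have hm : (pvDigits number).length ≤ (number + 1 - 1).toNat := by
      have := pvDigits_length_le number h; omega
    rw [pvLoop_eval _ hk _ 0 number (by omega) hm]
    simp
  · have hr : PySem.List.pyRange 1 (number + 1) 1 = [] :=
      PySem.List.pyRange_one_eq_nil (by omega)
    have hd : pvDigits number = [] := by rw [pvDigits]; simp [h]
    simp [hr, hd]
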